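-- pv_equiv track=rewrite | github.com/Security-Onion-Solutions/securityonion-image | so-logscan/logscan/readkratos.py | time_split
-- ===== SOURCE A (Python) =====
-- def time_split(processed_data, seconds):
--     split_data = []
--     for i in processed_data:
--         new_data = []
--         current_time = i[0][1]
--         for x in i:
--             if x[1] < (current_time + seconds):
--                 new_data.append(x)
--
--             else:
--                 split_data.append(new_data)
--                 new_data = [x]
--                 current_time = x[1]
--
--         split_data.append(new_data)
--
--     return split_data
-- ===== SOURCE B (Python) =====
-- def time_split(processed_data, seconds):
--     split_data = []
--     for i in processed_data:
--         current_time = i[0][1]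
--         cuts = [0]
--         for idx, x in enumerate(i):
--             if x[1] >= current_time + seconds:
--                 cuts.append(idx)
--                 current_time = x[1]
--         cuts.append(len(i))
--         for a, b in zip(cuts, cuts[1:]):
--             split_data.append(i[a:b])
--     return split_data
-- ===== Notes on version B (the rewrite author's own statement) =====
-- stated objective: alternative
-- what changed: B first records the indices where a new time window begins (one index-scan per subgroup) and then builds the output by slicing each subgroup between consecutive cut indices, instead of A's single stateful scan that grows and flushes a mutable current-window list.
import Mathlib
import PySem

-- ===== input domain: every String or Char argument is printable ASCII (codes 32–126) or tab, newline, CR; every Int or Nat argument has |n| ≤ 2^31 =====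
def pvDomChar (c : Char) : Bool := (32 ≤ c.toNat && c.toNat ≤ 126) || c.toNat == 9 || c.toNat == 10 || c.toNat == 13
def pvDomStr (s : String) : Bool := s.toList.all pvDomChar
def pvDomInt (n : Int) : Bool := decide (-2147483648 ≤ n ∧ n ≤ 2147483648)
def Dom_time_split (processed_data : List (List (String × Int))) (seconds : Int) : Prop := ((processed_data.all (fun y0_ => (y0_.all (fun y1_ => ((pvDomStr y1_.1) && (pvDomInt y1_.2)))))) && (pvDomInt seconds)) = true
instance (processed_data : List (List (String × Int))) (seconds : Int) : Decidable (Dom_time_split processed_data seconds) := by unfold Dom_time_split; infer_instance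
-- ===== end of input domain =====

-- B replaces A's stateful grow-and-flush window list by a first pass recording cut indices
-- and a second pass slicing each subgroup between consecutive cuts (alternative decomposition).


-- ===== PORT A =====
-- inner loop body of A: state (split_data, new_data, current_time)
def tsStepA (seconds : Int)
    (st : List (List (String × Int)) × List (String × Int) × Int) (x : String × Int) :
    List (List (String × Int)) × List (String × Int) × Int :=
  if x.2 < st.2.2 + seconds then (st.1, st.2.1 ++ [x], st.2.2)
  else (st.1 ++ [st.2.1], [x], x.2)

def time_split (processed_data : List (List (String × Int))) (seconds : Int) :
    List (List (String × Int)) :=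
  processed_data.foldl (fun split_data i =>
    -- current_time = i[0][1]; raises IndexError on empty i (excluded by Pre_), default 0 here
    let ct : Int := ((PySem.List.pyGet? i 0).map Prod.snd).getD 0
    let st := i.foldl (tsStepA seconds) (split_data, [], ct)
    st.1 ++ [st.2.1]) []

-- ===== PORT B =====
-- inner loop body of B: state (cuts, current_time); fold over enumerate(i)
def tsStepB (seconds : Int) (st : List Int × Int) (p : Int × (String × Int)) : List Int × Int :=
  if st.2 + seconds ≤ p.2.2 then (st.1 ++ [p.1], p.2.2) else st

def time_split_alt (processed_data : List (List (String × Int))) (seconds : Int) :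
    List (List (String × Int)) :=
  processed_data.foldl (fun split_data i =>
    -- current_time = i[0][1]; raises IndexError on empty i (excluded by Pre_), default 0 here
    let ct : Int := ((PySem.List.pyGet? i 0).map Prod.snd).getD 0
    let st := (PySem.List.enumerate i).foldl (tsStepB seconds) ([0], ct)
    let cuts := st.1 ++ [(i.length : Int)]
    split_data ++ (cuts.zip cuts.tail).map (fun ab => PySem.List.slice i (some ab.1) (some ab.2))) []

-- ===== PRECONDITION & SPEC =====
-- Pre_ excludes inputs containing an empty subgroup, on which Python A (and B) raise IndexError at i[0][1].
def Pre_time_split (processed_data : List (List (String × Int))) (seconds : Int) : Prop :=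
  ∀ g ∈ processed_data, g ≠ []
instance (processed_data : List (List (String × Int))) (seconds : Int) : Decidable (Pre_time_split processed_data seconds) := by unfold Pre_time_split; infer_instance
def pvWitness_time_split : (List (List (String × Int))) × Int :=
  ([[("a", 0), ("b", 3), ("c", 5)], [("d", 10)]], 4)

def Spec_time_split (processed_data : List (List (String × Int))) (seconds : Int) (out : List (List (String × Int))) : Prop := out = time_split_alt processed_data seconds
instance (processed_data : List (List (String × Int))) (seconds : Int) (out : List (List (String × Int))) : Decidable (Spec_time_split processed_data seconds out) := by unfold Spec_time_split; infer_instance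

-- ===== CLAIM (what is proved, stated in full; the proofs are below) =====
def Claim_equal_time_split : Prop := ∀ (processed_data : List (List (String × Int))) (seconds : Int), Dom_time_split processed_data seconds → Pre_time_split processed_data seconds → Spec_time_split processed_data seconds (time_split processed_data seconds)

-- ===== LEMMAS AND PROOFS =====

-- common greedy-window spec both ports are reduced to
def goW (s : Int) (ct : Int) (nd : List (String × Int)) :
    List (String × Int) → List (List (String × Int))
  | [] => [nd]
  | x :: xs => if x.2 < ct + s then goW s ct (nd ++ [x]) xs else nd :: goW s x.2 [x] xs

-- A side: the inner fold accumulates onto split_data and produces goW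
theorem foldA_eq_goW (s : Int) (xs : List (String × Int)) :
    ∀ (sd : List (List (String × Int))) (nd : List (String × Int)) (ct : Int),
      (let st := xs.foldl (tsStepA s) (sd, nd, ct); st.1 ++ [st.2.1]) = sd ++ goW s ct nd xs := by
  induction xs with
  | nil => intro sd nd ct; simp [goW]
  | cons x xs ih =>
    intro sd nd ct
    simp only [List.foldl_cons, tsStepA, goW]
    by_cases h : x.2 < ct + s
    · simp [h, ih]
    · simp [h, ih, List.append_assoc]

-- B side helpers
theorem foldB_prefix (s : Int) (l : List (Int × (String × Int))) :
    ∀ (cs : List Int) (ct : Int),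
      l.foldl (tsStepB s) (cs, ct) =
        (cs ++ (l.foldl (tsStepB s) ([], ct)).1, (l.foldl (tsStepB s) ([], ct)).2) := by
  induction l with
  | nil => intro cs ct; simp
  | cons p l ih =>
    intro cs ct
    simp only [List.foldl_cons, tsStepB]
    by_cases h : ct + s ≤ p.2.2
    · simp only [h, if_pos]
      rw [ih (cs ++ [p.1]) p.2.2, ih ([] ++ [p.1]) p.2.2]
      simp
    · simp only [h, if_neg, not_false_iff]
      exact ih cs ct

-- the zip-with-tail map equals adjacent-pair slicing, expressed recursively
def slicesAdj (i : List (String × Int)) : List Int → List (List (String × Int))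
  | a :: b :: rest => PySem.List.slice i (some a) (some b) :: slicesAdj i (b :: rest)
  | _ => []

theorem zip_tail_eq_slicesAdj (i : List (String × Int)) (cuts : List Int) :
    (cuts.zip cuts.tail).map (fun ab => PySem.List.slice i (some ab.1) (some ab.2)) =
      slicesAdj i cuts := by
  induction cuts with
  | nil => simp [slicesAdj]
  | cons a rest ih =>
    cases rest with
    | nil => simp [slicesAdj]
    | cons b rest' =>
      simp only [List.tail_cons, List.zip_cons_cons, List.map_cons, slicesAdj]
      rw [← ih]
      simp

-- main B-side invariant: slicing between the remaining cuts equals the greedy spec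
theorem sliceCuts_eq_goW (s : Int) (i : List (String × Int)) (xs : List (String × Int)) :
    ∀ (k c : Nat) (ct : Int), c ≤ k → i.drop k = xs →
      slicesAdj i (((c : Int) ::
          ((PySem.List.enumerate xs (k : Int)).foldl (tsStepB s) ([], ct)).1) ++ [(i.length : Int)]) =
        goW s ct ((i.take k).drop c) xs := by
  induction xs with
  | nil =>
    intro k c ct hck hdrop
    have hk : i.length ≤ k := List.drop_eq_nil_iff.mp hdrop
    have htake : i.take k = i := List.take_of_length_le hk
    simp only [PySem.List.enumerate_nil, List.foldl_nil, goW, htake]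
    simp only [List.cons_append, List.nil_append, slicesAdj]
    rw [PySem.List.slice_natCast]
    congr 1
    exact List.take_of_length_le (by simp)
  | cons x xs ih =>
    intro k c ct hck hdrop
    have hklt : k < i.length := by
      by_contra h
      rw [List.drop_eq_nil_of_le (Nat.le_of_not_lt h)] at hdrop
      simp at hdrop
    have hx : i[k] = x := by
      have h0 := congrArg (fun l => l[0]?) hdrop
      simp only [List.getElem?_drop, Nat.add_zero, List.getElem?_cons_zero,
        List.getElem?_eq_getElem hklt, Option.some.injEq] at h0
      exact h0
    have hdrop' : i.drop (k + 1) = xs := by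
      have h1 : (i.drop k).tail = i.drop (k + 1) := by rw [List.tail_drop]
      rw [hdrop] at h1; simpa using h1.symm
    have htake1 : i.take (k + 1) = i.take k ++ [x] := by
      rw [List.take_add_one]
      simp [List.getElem?_eq_getElem hklt, hx]
    have hcast : ((k : Int) + 1) = ((k + 1 : Nat) : Int) := by push_cast; ring
    rw [PySem.List.enumerate_cons]
    simp only [List.foldl_cons, tsStepB]
    by_cases h : ct + s ≤ x.2
    · simp only [h, if_pos]
      rw [foldB_prefix, hcast]
      have hIH := ih (k + 1) k x.2 (by omega) hdrop'
      have hwin : (i.take (k + 1)).drop k = [x] := by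
        rw [htake1, List.drop_append_of_le_length (by simp only [List.length_take]; omega),
          List.drop_eq_nil_of_le (List.length_take_le k i)]
        simp
      rw [hwin] at hIH
      have hgo : goW s ct ((i.take k).drop c) (x :: xs)
          = (i.take k).drop c :: goW s x.2 [x] xs := by
        simp [goW, show ¬ x.2 < ct + s by omega]
      rw [hgo, ← hIH]
      simp only [List.nil_append, List.cons_append]
      rw [slicesAdj]
      congr 1
      rw [PySem.List.slice_natCast, List.drop_take]
    · simp only [h, if_neg, not_false_iff]
      have hIH := ih (k + 1) c ct (by omega) hdrop'
      have hwin : (i.take (k + 1)).drop c = (i.take k).drop c ++ [x] := by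
        rw [htake1, List.drop_append_of_le_length (by simp only [List.length_take]; omega)]
      rw [hwin] at hIH
      rw [hcast, hIH]
      simp [goW, show x.2 < ct + s by omega]

-- per-subgroup equality of the two bodies
theorem seg_eq (s : Int) (i : List (String × Int)) (sd : List (List (String × Int))) :
    (let ct : Int := ((PySem.List.pyGet? i 0).map Prod.snd).getD 0
     let st := i.foldl (tsStepA s) (sd, [], ct)
     st.1 ++ [st.2.1]) =
    (let ct : Int := ((PySem.List.pyGet? i 0).map Prod.snd).getD 0
     let st := (PySem.List.enumerate i).foldl (tsStepB s) ([0], ct)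
     let cuts := st.1 ++ [(i.length : Int)]
     sd ++ (cuts.zip cuts.tail).map (fun ab => PySem.List.slice i (some ab.1) (some ab.2))) := by
  simp only []
  set ct : Int := ((PySem.List.pyGet? i 0).map Prod.snd).getD 0 with hct
  rw [foldA_eq_goW, zip_tail_eq_slicesAdj]
  congr 1
  have h0 : (PySem.List.enumerate i : List (Int × (String × Int))) = PySem.List.enumerate i ((0 : Nat) : Int) := by norm_num
  rw [foldB_prefix, h0]
  have := sliceCuts_eq_goW s i i 0 0 ct (le_refl 0) (by simp)
  simp only [Nat.cast_zero, List.take_zero, List.drop_nil] at this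
  simpa using this.symm

-- outer fold equality
theorem outer_eq (pd : List (List (String × Int))) (s : Int) :
    ∀ sd, pd.foldl (fun split_data i =>
        let ct : Int := ((PySem.List.pyGet? i 0).map Prod.snd).getD 0
        let st := i.foldl (tsStepA s) (split_data, [], ct)
        st.1 ++ [st.2.1]) sd =
      pd.foldl (fun split_data i =>
        let ct : Int := ((PySem.List.pyGet? i 0).map Prod.snd).getD 0
        let st := (PySem.List.enumerate i).foldl (tsStepB s) ([0], ct)
        let cuts := st.1 ++ [(i.length : Int)]
        split_data ++ (cuts.zip cuts.tail).map (fun ab => PySem.List.slice i (some ab.1) (some ab.2))) sd := by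
  induction pd with
  | nil => intro sd; rfl
  | cons i pd ih =>
    intro sd
    simp only [List.foldl_cons]
    rw [← seg_eq s i sd]
    exact ih _

-- ===== VERDICT (by name: the statement is the Claim_ definition above) =====
theorem time_split_spec : Claim_equal_time_split := by
  intro pd s _ _
  unfold Spec_time_split time_split time_split_alt
  exact outer_eq pd s []
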